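-- pv_equiv track=rewrite | github.com/matheusportela/Multiagent-RL | references/simulator/mypy.py | make_groups
-- ===== SOURCE A (Python) =====
-- from copy import copy, deepcopy
-- from operator import sub
--
-- def near(x, y):
--     nx, ny = map(sub, x, y)
--     return (abs(nx) == 1 and ny == 0) or (abs(ny) == 1 and nx == 0)
--
-- def make_groups(tiles):
--     groups = []
--     for tile in tiles:
--         group_append = [tile]
--         for group in copy(groups):
--             if any(near(f, tile) for f in group):
--                 group_append += group
--                 groups.remove(group)
--         groups.append(tuple(group_append))
--     return groups
-- ===== SOURCE B (Python) =====
-- def make_groups(tiles):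
--     # Coordinate-indexed grouping: groups are kept in a dict label -> member list
--     # (insertion order = output order, labels strictly increasing); a second dict
--     # maps each coordinate to the set of labels of groups containing it, so each
--     # tile merges by looking up only its 4 orthogonal neighbours instead of
--     # scanning every member of every group.
--     members = {}   # label -> list of tiles (group contents, in order)
--     at_coord = {}  # coordinate -> set of labels of groups containing it
--     nxt = 0
--     for tile in tiles:
--         x, y = tile
--         labs = set()
--         for nb in ((x - 1, y), (x + 1, y), (x, y - 1), (x, y + 1)):
--             labs |= at_coord.get(nb, set())
--         grp = [tile]
--         for l in sorted(labs):
--             old = members.pop(l)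
--             for c in old:
--                 at_coord[c].discard(l)
--             grp += old
--         lab = nxt
--         nxt += 1
--         members[lab] = grp
--         for c in grp:
--             at_coord.setdefault(c, set()).add(lab)
--     return [tuple(g) for g in members.values()]
-- ===== Notes on version B (the rewrite author's own statement) =====
-- stated objective: faster
-- what changed: Instead of scanning every member of every existing group for each tile (with list.remove inside the scan), B keeps a dict label->group (insertion order = output order) plus a coordinate->set-of-labels index, so each tile finds the groups to merge by looking up only its 4 orthogonal neighbour coordinates.
import Mathlib
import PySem

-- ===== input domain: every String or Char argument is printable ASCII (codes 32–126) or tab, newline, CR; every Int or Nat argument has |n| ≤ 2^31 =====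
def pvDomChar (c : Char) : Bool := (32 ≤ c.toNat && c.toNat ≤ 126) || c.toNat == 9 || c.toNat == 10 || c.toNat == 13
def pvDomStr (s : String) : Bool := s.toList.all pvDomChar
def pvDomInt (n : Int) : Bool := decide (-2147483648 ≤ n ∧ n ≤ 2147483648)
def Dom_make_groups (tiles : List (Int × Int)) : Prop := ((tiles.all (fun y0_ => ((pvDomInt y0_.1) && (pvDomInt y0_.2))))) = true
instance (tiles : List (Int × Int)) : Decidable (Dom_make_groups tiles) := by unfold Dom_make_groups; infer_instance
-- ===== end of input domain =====

-- B replaces A's per-tile scan over every member of every group by a coordinate->group-labels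
-- hash map consulted at the tile's 4 orthogonal neighbours (objective: faster merging).

-- ===== PORT A =====
def pvNear (x y : Int × Int) : Bool :=
  ((x.1 - y.1).natAbs == 1 && x.2 - y.2 == 0) || ((x.2 - y.2).natAbs == 1 && x.1 - y.1 == 0)

def pvAStep (tile : Int × Int) (st : List (Int × Int) × List (List (Int × Int)))
    (group : List (Int × Int)) : List (Int × Int) × List (List (Int × Int)) :=
  if group.any (fun f => pvNear f tile) then
    -- groups.remove(group): the removed group is always present, so remove? is never none
    (st.1 ++ group, (PySem.List.remove? st.2 group).getD st.2)
  else st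

def make_groups (tiles : List (Int × Int)) : List (List (Int × Int)) :=
  tiles.foldl (fun groups tile =>
    let st := groups.foldl (pvAStep tile) ([tile], groups)
    st.2 ++ [st.1]) []

-- ===== PORT B =====
def pvNbrs (tile : Int × Int) : List (Int × Int) :=
  [(tile.1 - 1, tile.2), (tile.1 + 1, tile.2), (tile.1, tile.2 - 1), (tile.1, tile.2 + 1)]

-- 'for c in old: at_coord[c].discard(l)'  (c is always a key of at_coord there)
def pvDiscardAll (l : Int) (old : List (Int × Int)) (ac : PySem.Dict (Int × Int) (PySem.Set Int)) :
    PySem.Dict (Int × Int) (PySem.Set Int) :=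
  old.foldl (fun ac c => ac.modify c PySem.Set.empty (fun s => PySem.Set.discard s l)) ac

-- 'for c in grp: at_coord.setdefault(c, set()).add(lab)'
def pvAddAll (lab : Int) (grp : List (Int × Int)) (ac : PySem.Dict (Int × Int) (PySem.Set Int)) :
    PySem.Dict (Int × Int) (PySem.Set Int) :=
  grp.foldl (fun ac c => ac.modify c PySem.Set.empty (fun s => PySem.Set.add s lab)) ac

-- body of 'for l in sorted(labs)': members.pop(l) (l is always a key, so getD's default is unused)
def pvPopStep
    (m : PySem.Dict Int (List (Int × Int)) × PySem.Dict (Int × Int) (PySem.Set Int) × List (Int × Int))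
    (l : Int) :
    PySem.Dict Int (List (Int × Int)) × PySem.Dict (Int × Int) (PySem.Set Int) × List (Int × Int) :=
  let old := m.1.getD l []
  (m.1.erase l, pvDiscardAll l old m.2.1, m.2.2 ++ old)

def pvBStep
    (st : PySem.Dict Int (List (Int × Int)) × PySem.Dict (Int × Int) (PySem.Set Int) × Int)
    (tile : Int × Int) :
    PySem.Dict Int (List (Int × Int)) × PySem.Dict (Int × Int) (PySem.Set Int) × Int :=
  let labs : PySem.Set Int :=
    (pvNbrs tile).foldl (fun s nb => PySem.Set.union s (st.2.1.getD nb PySem.Set.empty))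
      PySem.Set.empty
  let m := (PySem.List.sorted labs (fun l => l)).foldl pvPopStep (st.1, st.2.1, [tile])
  (m.1.insert st.2.2 m.2.2, pvAddAll st.2.2 m.2.2 m.2.1, st.2.2 + 1)

def make_groups_alt (tiles : List (Int × Int)) : List (List (Int × Int)) :=
  (tiles.foldl pvBStep (PySem.Dict.empty, PySem.Dict.empty, 0)).1.values

-- ===== PRECONDITION & SPEC =====
def Spec_make_groups (tiles : List (Int × Int)) (out : List (List (Int × Int))) : Prop := out = make_groups_alt tiles
instance (tiles : List (Int × Int)) (out : List (List (Int × Int))) : Decidable (Spec_make_groups tiles out) := by unfold Spec_make_groups; infer_instance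

-- ===== CLAIM (what is proved, stated in full; the proofs are below) =====
def Claim_equal_make_groups : Prop := ∀ (tiles : List (Int × Int)), Dom_make_groups tiles → Spec_make_groups tiles (make_groups tiles)

-- ===== LEMMAS AND PROOFS =====

-- a tile f is 'near' the current tile iff it is one of its 4 orthogonal neighbours
theorem pvNear_iff_mem_nbrs (f tile : Int × Int) : pvNear f tile = true ↔ f ∈ pvNbrs tile := by
  rcases f with ⟨a, b⟩; rcases tile with ⟨c, d⟩
  simp [pvNear, pvNbrs, Prod.ext_iff]
  omega

def pvMatch (tile : Int × Int) (g : List (Int × Int)) : Bool :=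
  g.any (fun f => pvNear f tile)

-- remove? finds the explicit occurrence when nothing equal precedes it
theorem pvRemove_append_cons {α : Type} [BEq α] [LawfulBEq α] (pre rest : List α) (v : α)
    (h : v ∉ pre) : PySem.List.remove? (pre ++ v :: rest) v = some (pre ++ rest) := by
  induction pre with
  | nil => simp [PySem.List.remove?, List.idxOf?_cons]
  | cons a pre ih =>
    simp only [List.mem_cons, not_or] at h
    have hav : (a == v) = false := by
      simp only [beq_eq_false_iff_ne]; exact fun hv => h.1 hv.symm
    have hrec := ih h.2
    simp only [PySem.List.remove?] at hrec ⊢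
    rcases h3 : List.idxOf? v (pre ++ v :: rest) with _ | k
    · rw [h3] at hrec; simp at hrec
    · rw [h3] at hrec
      simp only [Option.map_some, Option.some.injEq] at hrec
      rw [List.cons_append, List.idxOf?_cons, hav]
      simp [h3, List.eraseIdx_cons_succ, hrec]

-- A's inner loop over copy(groups) with list.remove is a partition of the groups
theorem pvAInner_eq (tile : Int × Int) :
    ∀ (rest pre : List (List (Int × Int))) (acc : List (Int × Int)),
    (∀ g ∈ pre, pvMatch tile g = false) →
    rest.foldl (pvAStep tile) (acc, pre ++ rest)
      = (acc ++ ((rest.filter (pvMatch tile)).flatten),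
         pre ++ rest.filter (fun g => !pvMatch tile g)) := by
  intro rest
  induction rest with
  | nil => intro pre acc _; simp
  | cons g rest ih =>
    intro pre acc hpre
    by_cases hm : pvMatch tile g = true
    · have hg : g ∉ pre := fun hmem => by simp [hpre g hmem] at hm
      have hrm := pvRemove_append_cons pre rest g hg
      simp only [List.foldl_cons, pvAStep]
      rw [show (g.any (fun f => pvNear f tile)) = pvMatch tile g from rfl, hm]
      simp only [if_true, hrm, Option.getD_some]
      rw [ih pre (acc ++ g) hpre]
      simp [hm, List.append_assoc]
    · simp only [List.foldl_cons, pvAStep]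
      rw [show (g.any (fun f => pvNear f tile)) = pvMatch tile g from rfl]
      simp only [hm, if_false, Bool.false_eq_true]
      have hpre' : ∀ g' ∈ pre ++ [g], pvMatch tile g' = false := by
        intro g' hg'
        rcases List.mem_append.1 hg' with h1 | h1
        · exact hpre g' h1
        · simp at h1; subst h1; simpa using hm
      have := ih (pre ++ [g]) acc hpre'
      rw [show pre ++ g :: rest = (pre ++ [g]) ++ rest by simp] 
      rw [this]
      simp [hm]

-- A's outer step in partition form
theorem pvAOuter_eq (groups : List (List (Int × Int))) (tile : Int × Int) :
    (let st := groups.foldl (pvAStep tile) ([tile], groups); st.2 ++ [st.1])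
      = groups.filter (fun g => !pvMatch tile g)
        ++ [tile :: (groups.filter (pvMatch tile)).flatten] := by
  have := pvAInner_eq tile groups [] [tile] (by simp)
  simp at this
  simp [this]

-- membership in the union over the neighbour lookups
theorem pvLabs_mem (tile : Int × Int) (ac : PySem.Dict (Int × Int) (PySem.Set Int)) (l : Int) :
    (l ∈ (pvNbrs tile).foldl
        (fun s nb => PySem.Set.union s (ac.getD nb PySem.Set.empty)) PySem.Set.empty)
      ↔ ∃ nb ∈ pvNbrs tile, l ∈ ac.getD nb PySem.Set.empty := by
  have aux : ∀ (nbs : List (Int × Int)) (s : PySem.Set Int),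
      (l ∈ nbs.foldl (fun s nb => PySem.Set.union s (ac.getD nb PySem.Set.empty)) s)
        ↔ l ∈ s ∨ ∃ nb ∈ nbs, l ∈ ac.getD nb PySem.Set.empty := by
    intro nbs
    induction nbs with
    | nil => intro s; simp
    | cons nb nbs ih =>
      intro s
      rw [List.foldl_cons, ih]
      simp [PySem.Set.mem_union]
      tauto
  simpa using aux (pvNbrs tile) PySem.Set.empty

theorem pvLabs_nodup (tile : Int × Int) (ac : PySem.Dict (Int × Int) (PySem.Set Int)) :
    ((pvNbrs tile).foldl
        (fun s nb => PySem.Set.union s (ac.getD nb PySem.Set.empty)) PySem.Set.empty).Nodup := by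
  have aux : ∀ (nbs : List (Int × Int)) (s : PySem.Set Int), s.Nodup →
      (nbs.foldl (fun s nb => PySem.Set.union s (ac.getD nb PySem.Set.empty)) s).Nodup := by
    intro nbs
    induction nbs with
    | nil => intro s hs; simpa using hs
    | cons nb nbs ih =>
      intro s hs
      exact ih _ (PySem.Set.nodup_union _ _ hs)
  exact aux _ _ (by simp [PySem.Set.empty])

-- membership after the discard loop
theorem pvDiscardAll_mem (l : Int) (old : List (Int × Int))
    (ac : PySem.Dict (Int × Int) (PySem.Set Int)) (c : Int × Int) (l' : Int) :
    (l' ∈ (pvDiscardAll l old ac).getD c PySem.Set.empty)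
      ↔ l' ∈ ac.getD c PySem.Set.empty ∧ ¬(l' = l ∧ c ∈ old) := by
  induction old generalizing ac with
  | nil => simp [pvDiscardAll]
  | cons c0 old ih =>
    rw [show pvDiscardAll l (c0 :: old) ac
        = pvDiscardAll l old (ac.modify c0 PySem.Set.empty (fun s => PySem.Set.discard s l))
        from rfl, ih]
    rw [PySem.Dict.getD_modify]
    by_cases hc : c = c0
    · subst hc; simp [PySem.Set.mem_discard]; tauto
    · rw [if_neg hc]; simp only [List.mem_cons]; tauto

theorem pvDiscardAll_nodup (l : Int) (old : List (Int × Int))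
    (ac : PySem.Dict (Int × Int) (PySem.Set Int))
    (h : ∀ c, (ac.getD c PySem.Set.empty).Nodup) :
    ∀ c, ((pvDiscardAll l old ac).getD c PySem.Set.empty).Nodup := by
  induction old generalizing ac with
  | nil => simpa [pvDiscardAll] using h
  | cons c0 old ih =>
    rw [show pvDiscardAll l (c0 :: old) ac
        = pvDiscardAll l old (ac.modify c0 PySem.Set.empty (fun s => PySem.Set.discard s l))
        from rfl]
    refine ih _ ?_
    intro c
    rw [PySem.Dict.getD_modify]
    by_cases hc : c = c0
    · rw [if_pos hc]
      exact PySem.Set.nodup_discard _ _ (h c0)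
    · rw [if_neg hc]; exact h c

-- membership after the add loop
theorem pvAddAll_mem (lab : Int) (grp : List (Int × Int))
    (ac : PySem.Dict (Int × Int) (PySem.Set Int)) (c : Int × Int) (l' : Int) :
    (l' ∈ (pvAddAll lab grp ac).getD c PySem.Set.empty)
      ↔ l' ∈ ac.getD c PySem.Set.empty ∨ (l' = lab ∧ c ∈ grp) := by
  induction grp generalizing ac with
  | nil => simp [pvAddAll]
  | cons c0 grp ih =>
    rw [show pvAddAll lab (c0 :: grp) ac
        = pvAddAll lab grp (ac.modify c0 PySem.Set.empty (fun s => PySem.Set.add s lab))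
        from rfl, ih]
    rw [PySem.Dict.getD_modify]
    by_cases hc : c = c0
    · subst hc; simp [PySem.Set.mem_add]; tauto
    · rw [if_neg hc]; simp only [List.mem_cons]; tauto

theorem pvAddAll_nodup (lab : Int) (grp : List (Int × Int))
    (ac : PySem.Dict (Int × Int) (PySem.Set Int))
    (h : ∀ c, (ac.getD c PySem.Set.empty).Nodup) :
    ∀ c, ((pvAddAll lab grp ac).getD c PySem.Set.empty).Nodup := by
  induction grp generalizing ac with
  | nil => simpa [pvAddAll] using h
  | cons c0 grp ih =>
    rw [show pvAddAll lab (c0 :: grp) ac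
        = pvAddAll lab grp (ac.modify c0 PySem.Set.empty (fun s => PySem.Set.add s lab))
        from rfl]
    refine ih _ ?_
    intro c
    rw [PySem.Dict.getD_modify]
    by_cases hc : c = c0
    · rw [if_pos hc]
      exact PySem.Set.nodup_add _ _ (h c0)
    · rw [if_neg hc]; exact h c

-- a pop-loop that never touches the head key leaves it in place
theorem pvPopFold_skip (k : Int) (v : List (Int × Int)) :
    ∀ (ls : List Int), (∀ l ∈ ls, l ≠ k) →
    ∀ (items : List (Int × List (Int × Int))) (ac : PySem.Dict (Int × Int) (PySem.Set Int))
      (grp : List (Int × Int)),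
    ls.foldl pvPopStep (PySem.Dict.mk ((k, v) :: items), ac, grp)
      = (PySem.Dict.mk ((k, v) :: (ls.foldl pvPopStep (PySem.Dict.mk items, ac, grp)).1.items),
         (ls.foldl pvPopStep (PySem.Dict.mk items, ac, grp)).2.1,
         (ls.foldl pvPopStep (PySem.Dict.mk items, ac, grp)).2.2) := by
  intro ls
  induction ls with
  | nil => intro _ items ac grp; rfl
  | cons l ls ih =>
    intro hne items ac grp
    have hlk : (k == l) = false := by
      simp only [beq_eq_false_iff_ne]
      exact fun h => hne l (by simp) h.symm
    rw [List.foldl_cons, List.foldl_cons]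
    have hstep : pvPopStep (PySem.Dict.mk ((k, v) :: items), ac, grp) l
        = (PySem.Dict.mk ((k, v) :: (pvPopStep (PySem.Dict.mk items, ac, grp) l).1.items),
           (pvPopStep (PySem.Dict.mk items, ac, grp) l).2.1,
           (pvPopStep (PySem.Dict.mk items, ac, grp) l).2.2) := by
      simp [pvPopStep, PySem.Dict.getD, PySem.Dict.get?, PySem.Dict.erase, hlk]
    rw [hstep, ih (fun x hx => hne x (by simp [hx]))]

-- the pop loop over the sorted matched labels, in items form
theorem pvPopFold_eq (p : List (Int × Int) → Bool) :
    ∀ (items : List (Int × List (Int × Int)))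
      (ac : PySem.Dict (Int × Int) (PySem.Set Int)) (grp : List (Int × Int)),
    (items.map Prod.fst).Nodup →
    ((items.filter (fun q => p q.2)).map Prod.fst).foldl pvPopStep (PySem.Dict.mk items, ac, grp)
      = (PySem.Dict.mk (items.filter (fun q => !p q.2)),
         (items.filter (fun q => p q.2)).foldl (fun a q => pvDiscardAll q.1 q.2 a) ac,
         grp ++ ((items.filter (fun q => p q.2)).map Prod.snd).flatten) := by
  intro items
  induction items with
  | nil => intro ac grp _; simp
  | cons q items ih =>
    intro ac grp Hnd
    obtain ⟨k, v⟩ := q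
    simp only [List.map_cons, List.nodup_cons] at Hnd
    obtain ⟨hk, hnd⟩ := Hnd
    by_cases hp : p v = true
    · rw [List.filter_cons_of_pos (by simpa using hp)]
      simp only [List.map_cons, List.foldl_cons]
      have hfil : items.filter (fun q => !(q.1 == k)) = items := by
        apply List.filter_eq_self.mpr
        intro a ha
        have : a.1 ≠ k := fun hak => hk (List.mem_map.mpr ⟨a, ha, hak⟩)
        simp [this]
      have hstep : pvPopStep (PySem.Dict.mk ((k, v) :: items), ac, grp) k
          = (PySem.Dict.mk items, pvDiscardAll k v ac, grp ++ v) := by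
        simp [pvPopStep, PySem.Dict.getD, PySem.Dict.get?, PySem.Dict.erase, hfil]
      rw [hstep, ih _ _ hnd]
      simp [hp, List.append_assoc]
    · have hpf : p v = false := by simpa using hp
      rw [show ((k, v) :: items).filter (fun q => p q.2)
            = items.filter (fun q => p q.2) by
          rw [List.filter_cons_of_neg (by simp [hpf])]]
      have hne : ∀ l ∈ (items.filter (fun q => p q.2)).map Prod.fst, l ≠ k := by
        intro l hl
        simp only [List.mem_map, List.mem_filter] at hl
        obtain ⟨q', ⟨hq', _⟩, rfl⟩ := hl
        exact fun hqk => hk (List.mem_map.mpr ⟨q', hq', hqk⟩)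
      rw [pvPopFold_skip k v _ hne items ac grp, ih _ _ hnd]
      simp [hpf]

-- the discard loops of all popped groups, membership and nodup
theorem pvDiscardFold_mem :
    ∀ (qs : List (Int × List (Int × Int))) (ac : PySem.Dict (Int × Int) (PySem.Set Int))
      (c : Int × Int) (l' : Int),
    (l' ∈ (qs.foldl (fun a q => pvDiscardAll q.1 q.2 a) ac).getD c PySem.Set.empty)
      ↔ l' ∈ ac.getD c PySem.Set.empty ∧ ¬∃ q ∈ qs, l' = q.1 ∧ c ∈ q.2 := by
  intro qs
  induction qs with
  | nil => intro ac c l'; simp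
  | cons q qs ih =>
    intro ac c l'
    rw [List.foldl_cons, ih, pvDiscardAll_mem]
    constructor
    · rintro ⟨⟨h1, h2⟩, h3⟩
      refine ⟨h1, ?_⟩
      rintro ⟨q', hq', he⟩
      rcases List.mem_cons.1 hq' with rfl | hq'
      · exact h2 he
      · exact h3 ⟨q', hq', he⟩
    · rintro ⟨h1, h2⟩
      refine ⟨⟨h1, fun he => h2 ⟨q, List.mem_cons_self, he⟩⟩, ?_⟩
      rintro ⟨q', hq', he⟩
      exact h2 ⟨q', List.mem_cons_of_mem _ hq', he⟩

theorem pvDiscardFold_nodup (qs : List (Int × List (Int × Int)))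
    (ac : PySem.Dict (Int × Int) (PySem.Set Int))
    (h : ∀ c, (ac.getD c PySem.Set.empty).Nodup) :
    ∀ c, ((qs.foldl (fun a q => pvDiscardAll q.1 q.2 a) ac).getD c PySem.Set.empty).Nodup := by
  induction qs generalizing ac with
  | nil => simpa using h
  | cons q qs ih => exact ih _ (pvDiscardAll_nodup q.1 q.2 ac h)

-- distinct keys determine the group
theorem pvKeyFun : ∀ (items : List (Int × List (Int × Int))), (items.map Prod.fst).Nodup →
    ∀ (l : Int) (g g' : List (Int × Int)), (l, g) ∈ items → (l, g') ∈ items → g = g' := by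
  intro items
  induction items with
  | nil => intro _ l g g' h1 _; cases h1
  | cons q items ih =>
    intro hnd l g g' h1 h2
    simp only [List.map_cons, List.nodup_cons] at hnd
    obtain ⟨hq, hnd⟩ := hnd
    rcases List.mem_cons.1 h1 with h1 | h1
    · cases h1
      rcases List.mem_cons.1 h2 with h2 | h2
      · exact ((Prod.ext_iff.1 h2).2).symm
      · have hmem2 : l ∈ List.map Prod.fst items := List.mem_map.mpr ⟨(l, g'), h2, rfl⟩
        exact absurd hmem2 hq
    · rcases List.mem_cons.1 h2 with h2 | h2
      · exfalso
        apply hq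
        rw [← (Prod.ext_iff.1 h2).1]
        exact List.mem_map.mpr ⟨(l, g), h1, rfl⟩
      · exact ih hnd l g g' h1 h2

-- map snd commutes with filtering on the snd component
theorem pvMapSndFilter (p : List (Int × Int) → Bool) :
    ∀ (items : List (Int × List (Int × Int))),
    (items.filter (fun q => p q.2)).map Prod.snd = (items.map Prod.snd).filter p := by
  intro items
  induction items with
  | nil => rfl
  | cons q items ih =>
    by_cases hp : p q.2 = true
    · rw [List.map_cons, List.filter_cons_of_pos (by simpa using hp),
          List.filter_cons_of_pos (by simpa using hp), List.map_cons, ih]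
    · rw [List.map_cons, List.filter_cons_of_neg (by simpa using hp),
          List.filter_cons_of_neg (by simpa using hp), ih]

-- simulation invariant between A's group list and B's dictionaries
def pvInv (groups : List (List (Int × Int))) (members : PySem.Dict Int (List (Int × Int)))
    (ac : PySem.Dict (Int × Int) (PySem.Set Int)) (nxt : Int) : Prop :=
  members.items.map Prod.snd = groups
  ∧ List.Pairwise (· < ·) (members.items.map Prod.fst)
  ∧ (∀ l ∈ members.items.map Prod.fst, l < nxt)
  ∧ (∀ c l, (l ∈ ac.getD c PySem.Set.empty) ↔ ∃ g, (l, g) ∈ members.items ∧ c ∈ g)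
  ∧ (∀ c, (ac.getD c PySem.Set.empty).Nodup)

theorem pvStep_sim (groups : List (List (Int × Int)))
    (members : PySem.Dict Int (List (Int × Int)))
    (ac : PySem.Dict (Int × Int) (PySem.Set Int)) (nxt : Int) (tile : Int × Int)
    (h : pvInv groups members ac nxt) :
    pvInv (groups.filter (fun g => !pvMatch tile g)
            ++ [tile :: (groups.filter (pvMatch tile)).flatten])
      (pvBStep (members, ac, nxt) tile).1
      (pvBStep (members, ac, nxt) tile).2.1
      (pvBStep (members, ac, nxt) tile).2.2 := by
  obtain ⟨hval, hsort, hlt, hmem, hnod⟩ := h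
  have hknd : (members.items.map Prod.fst).Nodup := hsort.imp (fun hab => ne_of_lt hab)
  -- the looked-up labels are exactly the labels of the groups adjacent to the tile
  have hlabs : ∀ l : Int,
      (l ∈ (pvNbrs tile).foldl
          (fun s nb => PySem.Set.union s (ac.getD nb PySem.Set.empty)) PySem.Set.empty)
        ↔ ∃ g, (l, g) ∈ members.items ∧ pvMatch tile g = true := by
    intro l
    rw [pvLabs_mem]
    constructor
    · rintro ⟨nb, hnb, hl⟩
      obtain ⟨g, hg, hcg⟩ := (hmem nb l).1 hl
      refine ⟨g, hg, ?_⟩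
      simp only [pvMatch, List.any_eq_true]
      exact ⟨nb, hcg, (pvNear_iff_mem_nbrs nb tile).2 hnb⟩
    · rintro ⟨g, hg, hm⟩
      simp only [pvMatch, List.any_eq_true] at hm
      obtain ⟨f, hf, hnear⟩ := hm
      exact ⟨f, (pvNear_iff_mem_nbrs f tile).1 hnear, (hmem f l).2 ⟨g, hg, hf⟩⟩
  -- sorted(labs) is the matched labels in group order
  have hsorted : PySem.List.sorted
        ((pvNbrs tile).foldl
          (fun s nb => PySem.Set.union s (ac.getD nb PySem.Set.empty)) PySem.Set.empty)
        (fun l => l)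
      = (members.items.filter (fun q => pvMatch tile q.2)).map Prod.fst := by
    apply PySem.List.sorted_eq_of_perm_of_pairwise_lt
    · have h1 : ((members.items.filter (fun q => pvMatch tile q.2)).map Prod.fst).Nodup :=
        hknd.sublist (List.filter_sublist.map Prod.fst)
      rw [List.perm_ext_iff_of_nodup h1 (pvLabs_nodup tile ac)]
      intro a
      rw [hlabs a]
      constructor
      · intro ha
        obtain ⟨q, hq, rfl⟩ := List.mem_map.1 ha
        obtain ⟨hq1, hq2⟩ := List.mem_filter.1 hq
        exact ⟨q.2, hq1, hq2⟩
      · rintro ⟨g, hg, hm⟩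
        exact List.mem_map.mpr ⟨(a, g), List.mem_filter.mpr ⟨hg, hm⟩, rfl⟩
    · exact hsort.sublist (List.filter_sublist.map Prod.fst)
  -- B's step in explicit form
  have hB : pvBStep (members, ac, nxt) tile
      = ((PySem.Dict.mk (members.items.filter (fun q => !pvMatch tile q.2))).insert nxt
           ([tile] ++ (((members.items.filter (fun q => pvMatch tile q.2)).map Prod.snd).flatten)),
         pvAddAll nxt
           ([tile] ++ (((members.items.filter (fun q => pvMatch tile q.2)).map Prod.snd).flatten))
           ((members.items.filter (fun q => pvMatch tile q.2)).foldl
             (fun a q => pvDiscardAll q.1 q.2 a) ac),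
         nxt + 1) := by
    simp only [pvBStep]
    rw [hsorted]
    rw [show members = PySem.Dict.mk members.items from rfl]
    rw [pvPopFold_eq (pvMatch tile) members.items ac [tile] hknd]
  rw [hB]
  -- the fresh label is new, so the insert appends
  have hnxt : ∀ q ∈ members.items.filter (fun q => !pvMatch tile q.2), q.1 ≠ nxt := by
    intro q hq
    have : q.1 ∈ members.items.map Prod.fst := List.mem_map.mpr ⟨q, (List.mem_filter.1 hq).1, rfl⟩
    exact ne_of_lt (hlt _ this)
  have hcont : (PySem.Dict.mk (members.items.filter (fun q => !pvMatch tile q.2))).contains nxt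
      = false := by
    rw [PySem.Dict.contains_eq_decide_mem_keys]
    simp only [decide_eq_false_iff_not, PySem.Dict.keys]
    intro hmemk
    obtain ⟨q, hq, hq1⟩ := List.mem_map.1 hmemk
    exact hnxt q hq hq1
  have hins : ((PySem.Dict.mk (members.items.filter (fun q => !pvMatch tile q.2))).insert nxt
        ([tile] ++ (((members.items.filter (fun q => pvMatch tile q.2)).map Prod.snd).flatten))).items
      = members.items.filter (fun q => !pvMatch tile q.2)
        ++ [(nxt, [tile] ++ (((members.items.filter (fun q => pvMatch tile q.2)).map Prod.snd).flatten))] := by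
    simp [PySem.Dict.insert, hcont]
  refine ⟨?_, ?_, ?_, ?_, ?_⟩
  · -- values
    show ((PySem.Dict.mk _).insert _ _).items.map Prod.snd = _
    rw [hins, List.map_append,
        pvMapSndFilter (fun g => !pvMatch tile g) members.items, hval]
    simp only [List.map_cons, List.map_nil]
    rw [pvMapSndFilter (pvMatch tile) members.items, hval]
    rfl
  · -- keys sorted
    show List.Pairwise (· < ·) (((PySem.Dict.mk _).insert _ _).items.map Prod.fst)
    rw [hins, List.map_append]
    rw [List.pairwise_append]
    refine ⟨hsort.sublist (List.filter_sublist.map Prod.fst), by simp, ?_⟩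
    intro a ha b hb
    simp only [List.map_cons, List.map_nil, List.mem_singleton] at hb
    subst hb
    obtain ⟨q, hq, rfl⟩ := List.mem_map.1 ha
    have : q.1 ∈ members.items.map Prod.fst :=
      List.mem_map.mpr ⟨q, (List.mem_filter.1 hq).1, rfl⟩
    exact hlt _ this
  · -- key bound
    show ∀ l ∈ ((PySem.Dict.mk _).insert _ _).items.map Prod.fst, l < nxt + 1
    rw [hins, List.map_append]
    intro l hl
    rcases List.mem_append.1 hl with hl | hl
    · obtain ⟨q, hq, rfl⟩ := List.mem_map.1 hl
      have : q.1 ∈ members.items.map Prod.fst :=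
        List.mem_map.mpr ⟨q, (List.mem_filter.1 hq).1, rfl⟩
      exact lt_trans (hlt _ this) (lt_add_one _)
    · simp only [List.map_cons, List.map_nil, List.mem_singleton] at hl
      subst hl
      exact lt_add_one _
  · -- coordinate index
    intro c l'
    show (l' ∈ (pvAddAll _ _ _).getD c PySem.Set.empty) ↔ _
    rw [pvAddAll_mem, pvDiscardFold_mem, hins]
    constructor
    · rintro (⟨h1, h2⟩ | ⟨rfl, hc⟩)
      · obtain ⟨g, hg, hcg⟩ := (hmem c l').1 h1
        have hgm : pvMatch tile g = false := by
          cases hpg : pvMatch tile g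
          · rfl
          · exact absurd ⟨(l', g), List.mem_filter.2 ⟨hg, hpg⟩, rfl, hcg⟩ h2
        exact ⟨g, List.mem_append_left _ (List.mem_filter.2 ⟨hg, by simp [hgm]⟩), hcg⟩
      · exact ⟨_, List.mem_append_right _ (List.mem_singleton.2 rfl), hc⟩
    · rintro ⟨g, hg, hcg⟩
      rcases List.mem_append.1 hg with hgl | hgr
      · obtain ⟨hgi, hgp⟩ := List.mem_filter.1 hgl
        left
        refine ⟨(hmem c l').2 ⟨g, hgi, hcg⟩, ?_⟩
        rintro ⟨⟨l2, g2⟩, hq', heq, hcq⟩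
        obtain ⟨hq'i, hq'p⟩ := List.mem_filter.1 hq'
        have hg2 : g = g2 := pvKeyFun members.items hknd l' g g2 hgi (heq ▸ hq'i)
        rw [← hg2] at hq'p
        simp [hq'p] at hgp
      · have := List.mem_singleton.1 hgr
        obtain ⟨h1, h2⟩ := Prod.ext_iff.1 this
        right
        have h1' : l' = nxt := h1
        have h2' : g = [tile]
            ++ ((List.map Prod.snd (List.filter (fun q => pvMatch tile q.2) members.items)).flatten) := h2
        exact ⟨h1', h2' ▸ hcg⟩
  · -- nodup sets
    exact pvAddAll_nodup _ _ _ (pvDiscardFold_nodup _ _ hnod)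

theorem pvSim (tiles : List (Int × Int)) :
    ∀ (groups : List (List (Int × Int))) (members : PySem.Dict Int (List (Int × Int)))
      (ac : PySem.Dict (Int × Int) (PySem.Set Int)) (nxt : Int),
    pvInv groups members ac nxt →
    pvInv (tiles.foldl (fun groups tile =>
            let st := groups.foldl (pvAStep tile) ([tile], groups)
            st.2 ++ [st.1]) groups)
      (tiles.foldl pvBStep (members, ac, nxt)).1
      (tiles.foldl pvBStep (members, ac, nxt)).2.1
      (tiles.foldl pvBStep (members, ac, nxt)).2.2 := by
  induction tiles with
  | nil => intro groups members ac nxt h; simpa using h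
  | cons t ts ih =>
    intro groups members ac nxt h
    have h1 := pvStep_sim groups members ac nxt t h
    have := ih _ _ _ _ h1
    simpa [pvAOuter_eq] using this

-- ===== VERDICT (by name: the statement is the Claim_ definition above) =====
theorem make_groups_spec : Claim_equal_make_groups := by
  intro tiles _
  unfold Spec_make_groups make_groups make_groups_alt
  have h0 : pvInv [] PySem.Dict.empty PySem.Dict.empty 0 := by
    constructor
    · rfl
    · refine ⟨by simp [PySem.Dict.empty], by simp [PySem.Dict.empty], ?_, ?_⟩
      · intro c l
        simp [PySem.Dict.empty, PySem.Dict.getD, PySem.Dict.get?, PySem.Set.empty]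
      · intro c
        simp [PySem.Dict.empty, PySem.Dict.getD, PySem.Dict.get?, PySem.Set.empty]
  have := pvSim tiles [] PySem.Dict.empty PySem.Dict.empty 0 h0
  obtain ⟨hv, -⟩ := this
  simp [PySem.Dict.values, hv]
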